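-- pv_equiv track=rewrite | github.com/duanxiaoxue001/xiaoxue002 | Desktop/projects/Rule-based RL-learning/agents/agent.py | get_earliest_start_time
-- ===== SOURCE A (Python) =====
-- def get_earliest_start_time(schedule, processing_time, earliest_from=0):  # 在 schedule 中查找插入该操作的最早可行时间点
--     time_slots = sorted(schedule, key=lambda x: x[0])
--     last_end = 0
--
--     for start, end in time_slots:
--         gap_start = max(last_end, earliest_from)
--         gap_end = start
--         if gap_end - gap_start >= processing_time:
--             return gap_start
--         last_end = max(last_end, end)
--
--     return max(last_end, earliest_from)
-- ===== SOURCE B (Python) =====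
-- def get_earliest_start_time(schedule, processing_time, earliest_from=0):
--     # Merge the sorted busy intervals into non-overlapping blocks, then scan the
--     # gaps between blocks for the first one that fits the processing time.
--     merged = []
--     for start, end in sorted(schedule, key=lambda x: x[0]):
--         if merged and start < merged[-1][1]:
--             merged[-1] = (merged[-1][0], max(merged[-1][1], end))
--         else:
--             merged.append((start, end))
--     prev_end = 0
--     for block_start, block_end in merged:
--         gap_start = max(prev_end, earliest_from)
--         if block_start - gap_start >= processing_time:
--             return gap_start
--         prev_end = max(prev_end, block_end)
--     return max(prev_end, earliest_from)
-- ===== Notes on version B (the rewrite author's own statement) =====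
-- stated objective: alternative
-- what changed: B first merges the sorted busy intervals into non-overlapping blocks (running max of ends), then a separate pass scans the gaps between blocks, instead of A's single stateful sweep that tests every raw interval against a running last_end.
-- outside the precondition, e.g. on get_earliest_start_time([(-10, 5), (3, 7)], -2, 0): A returns 5, B returns 7
import Mathlib
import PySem

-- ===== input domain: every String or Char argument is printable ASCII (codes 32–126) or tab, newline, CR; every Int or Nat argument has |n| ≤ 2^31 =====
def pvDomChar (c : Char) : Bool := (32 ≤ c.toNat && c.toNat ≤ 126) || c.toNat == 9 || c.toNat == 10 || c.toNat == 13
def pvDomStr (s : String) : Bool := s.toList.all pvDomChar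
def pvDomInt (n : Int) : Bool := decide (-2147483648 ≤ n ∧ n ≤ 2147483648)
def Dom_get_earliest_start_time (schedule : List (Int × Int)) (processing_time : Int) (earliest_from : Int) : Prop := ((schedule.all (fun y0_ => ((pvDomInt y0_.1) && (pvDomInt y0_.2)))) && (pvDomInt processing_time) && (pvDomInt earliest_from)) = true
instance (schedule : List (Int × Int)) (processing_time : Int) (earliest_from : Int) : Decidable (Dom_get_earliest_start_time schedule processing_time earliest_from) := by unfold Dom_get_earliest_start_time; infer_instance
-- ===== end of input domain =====

-- B merges the sorted busy intervals into non-overlapping blocks and then scans the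
-- gaps between blocks in a second pass (alternative decomposition, same cost).


-- ===== PORT A =====
-- A's for-loop with early return, carrying last_end
def pvALoop (processing_time earliest_from : Int) : List (Int × Int) → Int → Int
  | [], last_end => max last_end earliest_from
  | (start, «end») :: rest, last_end =>
    let gap_start := max last_end earliest_from
    let gap_end := start
    if gap_end - gap_start ≥ processing_time then gap_start
    else pvALoop processing_time earliest_from rest (max last_end «end»)

def get_earliest_start_time (schedule : List (Int × Int)) (processing_time : Int) (earliest_from : Int) : Int :=
  let time_slots := PySem.List.sorted schedule (fun x => x.1) false
  pvALoop processing_time earliest_from time_slots 0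

-- ===== PORT B =====
-- B's first loop: merged[-1] update / append, acc kept head-first (head = merged[-1])
def pvMergeStep (acc : List (Int × Int)) (p : Int × Int) : List (Int × Int) :=
  match acc with
  | (ms, me) :: rest => if p.1 < me then (ms, max me p.2) :: rest else (p.1, p.2) :: (ms, me) :: rest
  | [] => [(p.1, p.2)]

-- B's second loop with early return, carrying prev_end
def pvBLoop (processing_time earliest_from : Int) : List (Int × Int) → Int → Int
  | [], prev_end => max prev_end earliest_from
  | (block_start, block_end) :: rest, prev_end =>
    let gap_start := max prev_end earliest_from
    if block_start - gap_start ≥ processing_time then gap_start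
    else pvBLoop processing_time earliest_from rest (max prev_end block_end)

def get_earliest_start_time_alt (schedule : List (Int × Int)) (processing_time : Int) (earliest_from : Int) : Int :=
  let merged := ((PySem.List.sorted schedule (fun x => x.1) false).foldl pvMergeStep []).reverse
  pvBLoop processing_time earliest_from merged 0

-- ===== PRECONDITION & SPEC =====
-- Pre_ excludes negative processing_time (a meaningless duration): there A may return a
-- slot picked by scanning a raw interval that overlaps an earlier one, an artefact both
-- values of which are defensible, and B reports the gap of the merged blocks instead.
def Pre_get_earliest_start_time (schedule : List (Int × Int)) (processing_time : Int) (earliest_from : Int) : Prop :=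
  0 ≤ processing_time
instance (schedule : List (Int × Int)) (processing_time : Int) (earliest_from : Int) : Decidable (Pre_get_earliest_start_time schedule processing_time earliest_from) := by unfold Pre_get_earliest_start_time; infer_instance

def pvWitness_get_earliest_start_time : (List (Int × Int)) × Int × Int := ([(0, 5), (10, 20)], 3, 0)

def Spec_get_earliest_start_time (schedule : List (Int × Int)) (processing_time : Int) (earliest_from : Int) (out : Int) : Prop := out = get_earliest_start_time_alt schedule processing_time earliest_from
instance (schedule : List (Int × Int)) (processing_time : Int) (earliest_from : Int) (out : Int) : Decidable (Spec_get_earliest_start_time schedule processing_time earliest_from out) := by unfold Spec_get_earliest_start_time; infer_instance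

-- ===== CLAIM (what is proved, stated in full; the proofs are below) =====
def Claim_equal_get_earliest_start_time : Prop := ∀ (schedule : List (Int × Int)) (processing_time : Int) (earliest_from : Int), Dom_get_earliest_start_time schedule processing_time earliest_from → Pre_get_earliest_start_time schedule processing_time earliest_from → Spec_get_earliest_start_time schedule processing_time earliest_from (get_earliest_start_time schedule processing_time earliest_from)

-- ===== LEMMAS AND PROOFS =====

-- recursive description of B's merge loop (a "group" at a time)
def pvGo (rest : List (Int × Int)) (cs ce : Int) : List (Int × Int) :=
  match rest with
  | [] => [(cs, ce)]
  | (s, e) :: rest' => if s < ce then pvGo rest' cs (max ce e) else (cs, ce) :: pvGo rest' s e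

-- the foldl-with-reverse merge equals the group recursion
theorem pvFold_eq_go (rest : List (Int × Int)) : ∀ (cs ce : Int) (tail : List (Int × Int)),
    (rest.foldl pvMergeStep ((cs, ce) :: tail)).reverse = tail.reverse ++ pvGo rest cs ce := by
  induction rest with
  | nil => intro cs ce tail; simp [pvGo]
  | cons p rest' ih =>
    intro cs ce tail
    obtain ⟨s, e⟩ := p
    simp only [List.foldl_cons, pvMergeStep, pvGo]
    by_cases h : s < ce
    · simp [h, ih]
    · simp [h, ih ((s,e)).1 ((s,e)).2 ((cs,ce)::tail)]

-- key step: A's sweep over a group equals B's check on the merged block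
theorem pvStep (pt ef : Int) (hpt : 0 ≤ pt) (rest : List (Int × Int)) : ∀ (cs ce last : Int),
    (if cs - max last ef ≥ pt then max last ef else pvALoop pt ef rest (max last ce))
      = pvBLoop pt ef (pvGo rest cs ce) last := by
  induction rest with
  | nil =>
    intro cs ce last
    simp only [pvGo, pvBLoop, pvALoop]
  | cons p rest' ih =>
    intro cs ce last
    obtain ⟨s, e⟩ := p
    simp only [pvGo]
    by_cases h : s < ce
    · simp only [h, if_pos]
      rw [← ih cs (max ce e) last]
      have hA : pvALoop pt ef ((s, e) :: rest') (max last ce) = pvALoop pt ef rest' (max last (max ce e)) := by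
        have h1 : ce ≤ max (max last ce) ef := le_trans (le_max_right last ce) (le_max_left _ ef)
        simp only [pvALoop]
        split_ifs with hx
        · exfalso; omega
        · rw [max_assoc]
      rw [hA]
    · simp only [h, if_neg, not_false_iff]
      simp only [pvBLoop]
      by_cases hc : cs - max last ef ≥ pt
      · simp [hc]
      · simp only [hc, if_neg, not_false_iff]
        rw [← ih s e (max last ce)]
        simp [pvALoop]

-- ===== VERDICT (by name: the statement is the Claim_ definition above) =====
theorem get_earliest_start_time_spec : Claim_equal_get_earliest_start_time := by
  intro schedule pt ef _ hpre
  unfold Spec_get_earliest_start_time get_earliest_start_time get_earliest_start_time_alt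
  simp only
  generalize PySem.List.sorted schedule (fun x => x.1) false = ts
  cases ts with
  | nil => simp [pvALoop, pvBLoop]
  | cons p rest =>
    obtain ⟨s, e⟩ := p
    have hfold : ((((s, e) :: rest).foldl pvMergeStep []).reverse) = pvGo rest s e := by
      simpa [pvMergeStep] using pvFold_eq_go rest s e []
    rw [hfold, ← pvStep pt ef hpre rest s e 0]
    simp [pvALoop]
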